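-- pv_equiv track=rewrite | github.com/charlieringer/SpotTheBotWorkshop | log_parser.py | getFormatedFileNameData
-- ===== SOURCE A (Python) =====
-- def getFormatedFileNameData(fileName):
-- 	formattedString = ""
-- 	if("human" in fileName):
-- 		formattedString += "1,"
-- 	else:
-- 		formattedString += "0,"
--
-- 	gameID = ''
-- 	levelID = ''
-- 	userID = ''
-- 	skill = ''
--
-- 	parsingID = 0
-- 	for char in fileName:
-- 		if char == '_':
-- 			parsingID+=1
-- 			continue
-- 		if parsingID == 1: gameID+=char
-- 		elif parsingID == 2: levelID+=char
-- 		elif parsingID == 3: userID+=char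
-- 		elif parsingID == 4: skill+=char
-- 	return formattedString + userID +"," + skill +  "," + gameID +"," + levelID +","
-- ===== SOURCE B (Python) =====
-- def getFormatedFileNameData(fileName):
--     parts = fileName.split('_') + [''] * 5
--     gameID, levelID, userID, skill = parts[1], parts[2], parts[3], parts[4]
--     flag = "1," if "human" in fileName else "0,"
--     return flag + userID + "," + skill + "," + gameID + "," + levelID + ","
-- ===== Notes on version B (the rewrite author's own statement) =====
-- stated objective: idiomatic
-- what changed: B tokenizes the filename once with str.split (padded with empty strings) and indexes the four fields, instead of A's per-character state machine counting separators.
import Mathlib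
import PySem

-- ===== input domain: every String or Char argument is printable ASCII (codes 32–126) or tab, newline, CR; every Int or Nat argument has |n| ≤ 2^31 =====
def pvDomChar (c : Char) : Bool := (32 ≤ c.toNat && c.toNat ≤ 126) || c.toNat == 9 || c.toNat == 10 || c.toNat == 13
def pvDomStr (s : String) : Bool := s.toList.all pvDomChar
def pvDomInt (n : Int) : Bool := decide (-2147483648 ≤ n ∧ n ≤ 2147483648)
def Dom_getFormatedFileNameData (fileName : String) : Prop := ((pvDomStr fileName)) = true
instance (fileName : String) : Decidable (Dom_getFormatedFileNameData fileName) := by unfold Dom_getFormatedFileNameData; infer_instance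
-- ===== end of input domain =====

-- B tokenizes the filename once with split('_') (padded with empty segments) and indexes the four
-- fields, instead of A's per-character state machine counting underscores; objective: more idiomatic.


-- ===== PORT A =====
-- A's loop body: state = (gameID, levelID, userID, skill, parsingID)
def pvStepA (st : List Char × List Char × List Char × List Char × Int) (char : Char) :
    List Char × List Char × List Char × List Char × Int :=
  if char = '_' then (st.1, st.2.1, st.2.2.1, st.2.2.2.1, st.2.2.2.2 + 1)
  else if st.2.2.2.2 = 1 then (st.1 ++ [char], st.2.1, st.2.2.1, st.2.2.2.1, st.2.2.2.2)
  else if st.2.2.2.2 = 2 then (st.1, st.2.1 ++ [char], st.2.2.1, st.2.2.2.1, st.2.2.2.2)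
  else if st.2.2.2.2 = 3 then (st.1, st.2.1, st.2.2.1 ++ [char], st.2.2.2.1, st.2.2.2.2)
  else if st.2.2.2.2 = 4 then (st.1, st.2.1, st.2.2.1, st.2.2.2.1 ++ [char], st.2.2.2.2)
  else st

def getFormatedFileNameData (fileName : String) : String :=
  let formattedString := if PySem.Str.isIn "human" fileName then "1,".toList else "0,".toList
  let st := fileName.toList.foldl pvStepA ([], [], [], [], (0 : Int))
  String.mk (formattedString ++ st.2.2.1 ++ [','] ++ st.2.2.2.1 ++ [','] ++ st.1 ++ [','] ++ st.2.1 ++ [','])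

-- ===== PORT B =====
-- parts is padded to length ≥ 6, so Python's parts[1..4] never raise; pyGetD's default is dead code.
def getFormatedFileNameData_alt (fileName : String) : String :=
  let parts := PySem.Chars.splitOn fileName.toList ['_'] ++ List.replicate 5 ([] : List Char)
  let gameID := PySem.List.pyGetD parts 1 []
  let levelID := PySem.List.pyGetD parts 2 []
  let userID := PySem.List.pyGetD parts 3 []
  let skill := PySem.List.pyGetD parts 4 []
  let flag := if PySem.Str.isIn "human" fileName then "1,".toList else "0,".toList
  String.mk (flag ++ userID ++ [','] ++ skill ++ [','] ++ gameID ++ [','] ++ levelID ++ [','])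

-- ===== PRECONDITION & SPEC =====
def Spec_getFormatedFileNameData (fileName : String) (out : String) : Prop := out = getFormatedFileNameData_alt fileName
instance (fileName : String) (out : String) : Decidable (Spec_getFormatedFileNameData fileName out) := by unfold Spec_getFormatedFileNameData; infer_instance

-- ===== CLAIM (what is proved, stated in full; the proofs are below) =====
def Claim_equal_getFormatedFileNameData : Prop := ∀ (fileName : String), Dom_getFormatedFileNameData fileName → Spec_getFormatedFileNameData fileName (getFormatedFileNameData fileName)

-- ===== LEMMAS AND PROOFS =====

-- reference segmentation: the '_'-separated pieces of a character list
def pvSegs : List Char → List (List Char)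
  | [] => [[]]
  | c :: cs =>
    if c = '_' then [] :: pvSegs cs
    else
      match pvSegs cs with
      | [] => [[c]]
      | h :: t => (c :: h) :: t

lemma pvSegs_ne_nil (cs : List Char) : pvSegs cs ≠ [] := by
  cases cs with
  | nil => simp [pvSegs]
  | cons c cs =>
    simp only [pvSegs]
    split
    · simp
    · rcases h : pvSegs cs with _ | ⟨h0, t⟩ <;> simp

lemma splitOn_go_eq (l : List Char) : ∀ (fuel : Nat) (cur : List Char) (acc : List (List Char)),
    l.length < fuel →
    PySem.Chars.splitOn.go ['_'] fuel l cur acc =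
      acc.reverse ++ ((cur.reverse ++ (pvSegs l).headI) :: (pvSegs l).tail) := by
  induction l with
  | nil =>
    intro fuel cur acc h
    cases fuel with
    | zero => omega
    | succ f => simp [PySem.Chars.splitOn.go, pvSegs]
  | cons c rest ih =>
    intro fuel cur acc h
    cases fuel with
    | zero => simp at h
    | succ f =>
      by_cases hc : c = '_'
      · subst hc
        rw [PySem.Chars.splitOn.go]
        simp only [List.isPrefixOf, beq_self_eq_true, Bool.true_and,
          if_pos, List.length_cons, List.drop_succ_cons]
        simp only [List.length_nil, List.drop_zero]
        rw [ih f [] (cur.reverse :: acc) (by simpa using h)]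
        rcases hseg : pvSegs rest with _ | ⟨h0, t⟩
        · exact absurd hseg (pvSegs_ne_nil rest)
        · simp [pvSegs, hseg]
      · rw [PySem.Chars.splitOn.go]
        have hpre : List.isPrefixOf ['_'] (c :: rest) = false := by
          simp [List.isPrefixOf]
          exact fun hh => hc hh.symm
        simp only [hpre, Bool.false_eq_true, if_false]
        rw [ih f (c :: cur) acc (by simpa using h)]
        rcases hseg : pvSegs rest with _ | ⟨h0, t⟩
        · exact absurd hseg (pvSegs_ne_nil rest)
        · simp [pvSegs, hc, hseg]

lemma splitOn_eq_pvSegs (cs : List Char) : PySem.Chars.splitOn cs ['_'] = pvSegs cs := by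
  unfold PySem.Chars.splitOn
  rw [splitOn_go_eq cs (cs.length + 1) [] [] (by omega)]
  rcases hseg : pvSegs cs with _ | ⟨h0, t⟩
  · exact absurd hseg (pvSegs_ne_nil cs)
  · simp

-- the characters A's state machine appends to field k when the remaining input is cs and parsingID = pid
def pvPick (k pid : Int) (cs : List Char) : List Char :=
  if pid ≤ k then (pvSegs cs).getD (k - pid).toNat [] else []

lemma pvPick_nil (k pid : Int) : pvPick k pid [] = [] := by
  unfold pvPick
  split
  · cases h : (k - pid).toNat <;> simp [pvSegs, List.getD]
  · rfl

lemma pvPick_underscore (k pid : Int) (cs : List Char) :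
    pvPick k pid ('_' :: cs) = pvPick k (pid + 1) cs := by
  unfold pvPick
  simp only [pvSegs, if_pos rfl]
  split_ifs with h1 h2 h2
  · have : (k - pid).toNat = (k - (pid + 1)).toNat + 1 := by omega
    rw [this]; simp [List.getD]
  · have : (k - pid).toNat = 0 := by omega
    rw [this]; simp [List.getD]
  · omega
  · rfl

lemma pvPick_char {c : Char} (hc : c ≠ '_') (k pid : Int) (cs : List Char) :
    pvPick k pid (c :: cs) = (if pid = k then [c] else []) ++ pvPick k pid cs := by
  unfold pvPick
  rcases hseg : pvSegs cs with _ | ⟨h0, t⟩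
  · exact absurd hseg (pvSegs_ne_nil cs)
  · simp only [pvSegs, hc, if_false, hseg]
    split_ifs with h1 h2 h2
    · subst h2
      simp [List.getD]
    · have harith : (k - pid).toNat = (k - pid - 1).toNat + 1 := by omega
      rw [harith]
      simp [List.getD]
    · omega
    · rfl

lemma foldA_eq (cs : List Char) : ∀ (g l u s : List Char) (pid : Int),
    cs.foldl pvStepA (g, l, u, s, pid) =
      (g ++ pvPick 1 pid cs, l ++ pvPick 2 pid cs, u ++ pvPick 3 pid cs, s ++ pvPick 4 pid cs,
        pid + cs.count '_') := by
  induction cs with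
  | nil => intro g l u s pid; simp [pvPick_nil]
  | cons c cs ih =>
    intro g l u s pid
    rw [List.foldl_cons]
    by_cases hc : c = '_'
    · subst hc
      show List.foldl pvStepA (pvStepA (g, l, u, s, pid) '_') cs = _
      simp only [pvStepA, if_pos rfl]
      rw [ih]
      simp [pvPick_underscore, List.count_cons]
      omega
    · show List.foldl pvStepA (pvStepA (g, l, u, s, pid) c) cs = _
      simp only [pvStepA, hc, if_false]
      have hcount : (c :: cs).count '_' = cs.count '_' := by
        simp [List.count_cons, hc]
      split_ifs with h1 h2 h3 h4 <;>
        rw [ih] <;>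
        simp [pvPick_char hc, h1, *, hcount] <;>
        simp [Ne.symm, fun h => h1, List.append_assoc]
    
lemma pad_getD (xs : List (List Char)) (k : Nat) (hk : k < 5) :
    (xs ++ List.replicate 5 ([] : List Char)).getD k [] = xs.getD k [] := by
  rcases lt_or_ge k xs.length with h | h
  · simp [List.getD, List.getElem?_append_left h]
  · have h5 : k - xs.length < 5 := by omega
    simp [List.getD, List.getElem?_append_right h, h5,
      List.getElem?_eq_none_iff.mpr h]
    set m := k - xs.length with hm
    interval_cases m <;> simp [← hm]

-- ===== VERDICT (by name: the statement is the Claim_ definition above) =====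
theorem getFormatedFileNameData_spec : Claim_equal_getFormatedFileNameData := by
  intro fileName _
  unfold Spec_getFormatedFileNameData getFormatedFileNameData getFormatedFileNameData_alt
  have hfold := foldA_eq fileName.toList [] [] [] [] 0
  simp only [List.nil_append] at hfold
  rw [hfold]
  have hget : ∀ k : Nat, k < 5 →
      PySem.List.pyGetD (PySem.Chars.splitOn fileName.toList ['_'] ++ List.replicate 5 ([] : List Char)) (k : Int) [] =
        (pvSegs fileName.toList).getD k [] := by
    intro k hk
    rw [PySem.List.pyGetD_natCast, pad_getD _ k hk, splitOn_eq_pvSegs]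
  have hpick : ∀ k : Int, 0 ≤ k → pvPick k 0 fileName.toList = (pvSegs fileName.toList).getD k.toNat [] := by
    intro k hk
    unfold pvPick
    simp [hk]
  simp only []
  rw [show ((1:Int)) = ((1:Nat):Int) by norm_num, show ((2:Int)) = ((2:Nat):Int) by norm_num,
    show ((3:Int)) = ((3:Nat):Int) by norm_num, show ((4:Int)) = ((4:Nat):Int) by norm_num]
  rw [hget 1 (by omega), hget 2 (by omega), hget 3 (by omega), hget 4 (by omega)]
  simp only [hpick, Int.toNat_natCast, Int.natCast_nonneg]
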